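-- pv_equiv track=rewrite | github.com/Bomin-Seo/Study | Coding Test/Programmers_python/programmers_lv1_성격유형검사.py | solution
-- ===== SOURCE A (Python) =====
-- def solution(survey, choices):
--     answer = ''
--     types_dic = {'R':0 ,'T':0, 'C': 0, 'F':0, 'J':0, 'M':0, 'A':0, 'N':0}
--     for i in range(len(survey)):
--         if choices[i] in range(1, 4):
--             types_dic[survey[i][0]] += (4 - choices[i])
--         else:
--             types_dic[survey[i][1]] += (choices[i] - 4)
--
--     for i in range(0, 8, 2):
--         if types_dic[list(types_dic.keys())[i]] >= types_dic[list(types_dic.keys())[i+1]]: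
--             answer += list(types_dic.keys())[i]
--         else:
--             answer += list(types_dic.keys())[i+1]
--     return answer
-- ===== SOURCE B (Python) =====
-- def solution(survey, choices):
--     # No score table at all: each axis is judged by its own independent pass,
--     # summing the signed pull toward the axis's first letter read from survey[i][0].
--     def net(a, b):
--         total = 0
--         for s, c in zip(survey, choices):
--             if s[0] == a:
--                 total += 4 - c
--             elif s[0] == b:
--                 total += c - 4
--         return total
--     return ''.join(a if net(a, b) >= 0 else b for a, b in ('RT', 'CF', 'JM', 'AN'))
-- ===== Notes on version B (the rewrite author's own statement) =====
-- stated objective: alternative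
-- what changed: B removes A's mutable score dictionary and its key-list rebuilds entirely: each of the four axes is decided by its own independent pass over zip(survey,choices) that sums a signed pull (4-c toward the axis's first letter, c-4 toward the second) read only from survey[i][0], emitting the first letter iff the net is >= 0.
-- outside the precondition, e.g. on solution(['RC'], [5]): A returns 'RCJA', B returns 'TCJA'
import Mathlib
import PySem

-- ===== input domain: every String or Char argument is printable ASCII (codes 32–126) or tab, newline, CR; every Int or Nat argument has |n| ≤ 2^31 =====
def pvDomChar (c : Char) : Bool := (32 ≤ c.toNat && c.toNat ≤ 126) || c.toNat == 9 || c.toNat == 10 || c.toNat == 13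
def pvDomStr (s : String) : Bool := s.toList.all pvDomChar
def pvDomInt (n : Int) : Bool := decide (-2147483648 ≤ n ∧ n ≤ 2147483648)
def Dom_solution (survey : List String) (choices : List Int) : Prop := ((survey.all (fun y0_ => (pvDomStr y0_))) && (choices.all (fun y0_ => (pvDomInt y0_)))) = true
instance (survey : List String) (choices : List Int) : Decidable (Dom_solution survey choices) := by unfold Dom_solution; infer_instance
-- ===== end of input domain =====

-- B discards A's score dictionary: each axis is decided by its own independent pass summing a
-- signed pull read from the entry's first letter (objective: alternative decomposition; return
-- value only, no mutation involved).

-- ===== PORT A =====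
def solution (survey : List String) (choices : List Int) : String :=
  let types_dic : PySem.Dict Char Int :=
    PySem.Dict.ofList [('R',0),('T',0),('C',0),('F',0),('J',0),('M',0),('A',0),('N',0)]
  let types_dic := (PySem.List.pyRange 0 (survey.length : Int) 1).foldl (fun d i =>
    -- choices[i] / survey[i][0] / survey[i][1] read with defaults: exact under Pre_solution
    -- (index in range, survey entries long enough, letters present as keys)
    let c := PySem.List.pyGetD choices i 0
    let s := PySem.List.pyGetD survey i ""
    if 1 ≤ c ∧ c < 4 then
      d.modify ((PySem.Str.pyGet? s 0).getD ' ') 0 (· + (4 - c))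
    else
      d.modify ((PySem.Str.pyGet? s 1).getD ' ') 0 (· + (c - 4))) types_dic
  (PySem.List.pyRange 0 8 2).foldl (fun answer i =>
    if types_dic.getD (PySem.List.pyGetD types_dic.keys i ' ') 0 ≥
       types_dic.getD (PySem.List.pyGetD types_dic.keys (i+1) ' ') 0 then
      answer ++ String.ofList [PySem.List.pyGetD types_dic.keys i ' ']
    else
      answer ++ String.ofList [PySem.List.pyGetD types_dic.keys (i+1) ' ']) ""

-- ===== PORT B =====
-- one iteration of B's per-axis net loop (s[0] read with a default: exact under Pre_solution)
def pvStepN (a b : Char) (t : Int) (p : String × Int) : Int :=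
  if (PySem.Str.pyGet? p.1 0).getD ' ' = a then t + (4 - p.2)
  else if (PySem.Str.pyGet? p.1 0).getD ' ' = b then t + (p.2 - 4)
  else t

-- B's helper net(a, b): one pass over zip(survey, choices)
def pvNet (survey : List String) (choices : List Int) (a b : Char) : Int :=
  (survey.zip choices).foldl (pvStepN a b) 0

def solution_alt (survey : List String) (choices : List Int) : String :=
  PySem.Str.join "" ((([('R','T'),('C','F'),('J','M'),('A','N')] : List (Char × Char)).map
    (fun p => if pvNet survey choices p.1 p.2 ≥ 0 then String.ofList [p.1]
              else String.ofList [p.2])))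

-- ===== PRECONDITION & SPEC =====
-- Pre_ restricts to the problem's natural domain: every answer has a choice and every survey
-- entry either starts with one of the eight axis pairs or (for an agree-side choice 1..3, which
-- only reads the first letter) starts with one of the eight letters. A also returns (a
-- meaningless string) on some malformed entries whose second letter merely happens to be a dict
-- key (e.g. "RC" with choice 5); those are excluded.
def Pre_solution (survey : List String) (choices : List Int) : Prop :=
  survey.length ≤ choices.length ∧
  ∀ p ∈ survey.zip choices,
    (1 ≤ p.2 ∧ p.2 < 4 ∧ p.1.toList.take 1 ∈
      [['R'],['T'],['C'],['F'],['J'],['M'],['A'],['N']]) ∨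
    p.1.toList.take 2 ∈
      [['R','T'],['T','R'],['C','F'],['F','C'],['J','M'],['M','J'],['A','N'],['N','A']]
instance (survey : List String) (choices : List Int) : Decidable (Pre_solution survey choices) := by
  unfold Pre_solution; infer_instance
def pvWitness_solution : List String × List Int := (["RT", "FC", "MJ"], [2, 5, 7])
def Spec_solution (survey : List String) (choices : List Int) (out : String) : Prop := out = solution_alt survey choices
instance (survey : List String) (choices : List Int) (out : String) : Decidable (Spec_solution survey choices out) := by unfold Spec_solution; infer_instance

-- ===== CLAIM (what is proved, stated in full; the proofs are below) =====
def Claim_equal_solution : Prop := ∀ (survey : List String) (choices : List Int), Dom_solution survey choices → Pre_solution survey choices → Spec_solution survey choices (solution survey choices)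

-- ===== LEMMAS AND PROOFS =====

def pvKEYS : List Char := ['R','T','C','F','J','M','A','N']

def pvPAIRS : List (List Char) :=
  [['R','T'],['T','R'],['C','F'],['F','C'],['J','M'],['M','J'],['A','N'],['N','A']]

def pvInit : PySem.Dict Char Int :=
  PySem.Dict.ofList [('R',0),('T',0),('C',0),('F',0),('J',0),('M',0),('A',0),('N',0)]

-- one iteration of A's tally loop, as a function of the (survey entry, choice) pair
def pvStepA (d : PySem.Dict Char Int) (p : String × Int) : PySem.Dict Char Int :=
  if 1 ≤ p.2 ∧ p.2 < 4 then d.modify ((PySem.Str.pyGet? p.1 0).getD ' ') 0 (· + (4 - p.2))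
  else d.modify ((PySem.Str.pyGet? p.1 1).getD ' ') 0 (· + (p.2 - 4))

-- A's answer-building loop, as a function of the finished tally
def pvFinalA (dA : PySem.Dict Char Int) : String :=
  (PySem.List.pyRange 0 8 2).foldl (fun answer i =>
    if dA.getD (PySem.List.pyGetD dA.keys i ' ') 0 ≥
       dA.getD (PySem.List.pyGetD dA.keys (i+1) ' ') 0 then
      answer ++ String.ofList [PySem.List.pyGetD dA.keys i ' ']
    else
      answer ++ String.ofList [PySem.List.pyGetD dA.keys (i+1) ' ']) ""

theorem pvA_eq (survey : List String) (choices : List Int) :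
    solution survey choices =
      pvFinalA ((PySem.List.pyRange 0 (survey.length : Int) 1).foldl
        (fun d i => pvStepA d (PySem.List.pyGetD survey i "", PySem.List.pyGetD choices i 0))
        pvInit) := rfl

-- loop invariant: A's key list is unchanged and each axis difference equals B's running net
def pvInv (dA : PySem.Dict Char Int) (tR tC tJ tN : Int) : Prop :=
  dA.keys = pvKEYS ∧
  dA.getD 'R' 0 - dA.getD 'T' 0 = tR ∧
  dA.getD 'C' 0 - dA.getD 'F' 0 = tC ∧
  dA.getD 'J' 0 - dA.getD 'M' 0 = tJ ∧
  dA.getD 'A' 0 - dA.getD 'N' 0 = tN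

theorem pv_inv_init : pvInv pvInit 0 0 0 0 := by
  unfold pvInv pvInit pvKEYS
  exact ⟨by decide, by decide, by decide, by decide, by decide⟩

def pvOK (p : String × Int) : Prop :=
  (1 ≤ p.2 ∧ p.2 < 4 ∧ p.1.toList.take 1 ∈ [['R'],['T'],['C'],['F'],['J'],['M'],['A'],['N']]) ∨
  p.1.toList.take 2 ∈ pvPAIRS

theorem pv_take1 {l : List Char} {a : Char} (h : l.take 1 = [a]) : ∃ t, l = a :: t := by
  rcases l with _ | ⟨x, t⟩ <;> simp_all

theorem pv_take2 {l : List Char} {a b : Char} (h : l.take 2 = [a, b]) : ∃ t, l = a :: b :: t := by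
  rcases l with _ | ⟨x, _ | ⟨y, t⟩⟩ <;> simp_all

theorem pv_step (p : String × Int) (hv : pvOK p)
    {dA : PySem.Dict Char Int} {tR tC tJ tN : Int} (h : pvInv dA tR tC tJ tN) :
    pvInv (pvStepA dA p) (pvStepN 'R' 'T' tR p) (pvStepN 'C' 'F' tC p)
      (pvStepN 'J' 'M' tJ p) (pvStepN 'A' 'N' tN p) := by
  obtain ⟨hk, h1, h2, h3, h4⟩ := h
  have hc : ∀ c, c ∈ pvKEYS → dA.contains c = true :=
    fun c hcm => (PySem.Dict.contains_iff_mem_keys dA c).mpr (hk ▸ hcm)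
  have hcR := hc 'R' (by decide); have hcT := hc 'T' (by decide)
  have hcC := hc 'C' (by decide); have hcF := hc 'F' (by decide)
  have hcJ := hc 'J' (by decide); have hcM := hc 'M' (by decide)
  have hcA := hc 'A' (by decide); have hcN := hc 'N' (by decide)
  simp only [pvOK, pvPAIRS, List.mem_cons, List.not_mem_nil, or_false] at hv
  rcases hv with ⟨hcl, hcu, hv⟩ | hv
  · have hc4 : 1 ≤ p.2 ∧ p.2 < 4 := ⟨hcl, hcu⟩
    rcases hv with hv | hv | hv | hv | hv | hv | hv | hv <;>
      · obtain ⟨t, ht⟩ := pv_take1 hv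
        refine ⟨?_, ?_, ?_, ?_, ?_⟩ <;>
          simp [pvStepA, pvStepN, hc4, PySem.Str.pyGet?, ht, PySem.Dict.getD_modify,
                PySem.Dict.keys_modify, PySem.Dict.keys_insert_of_contains,
                hcR, hcT, hcC, hcF, hcJ, hcM, hcA, hcN, hk] <;> omega
  · rcases hv with hv | hv | hv | hv | hv | hv | hv | hv <;>
      · obtain ⟨t, ht⟩ := pv_take2 hv
        by_cases hc4 : 1 ≤ p.2 ∧ p.2 < 4 <;>
          refine ⟨?_, ?_, ?_, ?_, ?_⟩ <;>
            simp [pvStepA, pvStepN, hc4, PySem.Str.pyGet?, ht, PySem.Dict.getD_modify,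
                  PySem.Dict.keys_modify, PySem.Dict.keys_insert_of_contains,
                  hcR, hcT, hcC, hcF, hcJ, hcM, hcA, hcN, hk] <;> omega

theorem pv_inv_foldl (ps : List (String × Int)) :
    ∀ (dA : PySem.Dict Char Int) (tR tC tJ tN : Int), (∀ p ∈ ps, pvOK p) →
      pvInv dA tR tC tJ tN →
      pvInv (ps.foldl pvStepA dA) (ps.foldl (pvStepN 'R' 'T') tR)
        (ps.foldl (pvStepN 'C' 'F') tC) (ps.foldl (pvStepN 'J' 'M') tJ)
        (ps.foldl (pvStepN 'A' 'N') tN) := by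
  induction ps with
  | nil => intro dA tR tC tJ tN _ h; simpa using h
  | cons p ps ih =>
      intro dA tR tC tJ tN hv h
      simp only [List.foldl_cons]
      exact ih _ _ _ _ _ (fun q hq => hv q (List.mem_cons_of_mem _ hq))
        (pv_step p (hv p List.mem_cons_self) h)

theorem pvA_loop (survey : List String) (choices : List Int)
    (h : survey.length ≤ choices.length) (d0 : PySem.Dict Char Int) :
    (PySem.List.pyRange 0 (survey.length : Int) 1).foldl
      (fun d i => pvStepA d (PySem.List.pyGetD survey i "", PySem.List.pyGetD choices i 0)) d0
    = (survey.zip choices).foldl pvStepA d0 := by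
  have hlen : (survey.zip choices).length = survey.length := by
    simp [List.length_zip]; omega
  rw [show (survey.length : Int) = ((survey.zip choices).length : Int) by rw [hlen]]
  rw [← PySem.List.foldl_pyRange_zero_pyGetD' (survey.zip choices) ("", 0) pvStepA d0]
  apply PySem.List.foldl_congr_mem'
  intro i hi acc
  obtain ⟨h0, h1⟩ := PySem.List.mem_pyRange_one.mp hi
  congr 1
  have his : i < (survey.length : Int) := by omega
  have hic : i < (choices.length : Int) := by
    have h2 : (survey.length : Int) ≤ (choices.length : Int) := by exact_mod_cast h
    omega
  rw [PySem.List.pyGetD_eq_getElem _ _ h0 his, PySem.List.pyGetD_eq_getElem _ _ h0 hic,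
      PySem.List.pyGetD_eq_getElem _ _ h0 h1, List.getElem_zip]

theorem pv_join4 (s1 s2 s3 s4 : String) :
    ((("" ++ s1) ++ s2) ++ s3) ++ s4 = PySem.Str.join "" [s1, s2, s3, s4] := by
  refine String.toList_inj.mp ?_
  simp [PySem.Str.toList_join, PySem.Chars.join, List.intercalate]

theorem pv_pull_ite (c : Prop) [Decidable c] (a x y : String) :
    (if c then a ++ x else a ++ y) = a ++ (if c then x else y) := by
  split_ifs <;> rfl

theorem pv_final (survey : List String) (choices : List Int) (dA : PySem.Dict Char Int)
    (h : pvInv dA (pvNet survey choices 'R' 'T') (pvNet survey choices 'C' 'F')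
          (pvNet survey choices 'J' 'M') (pvNet survey choices 'A' 'N')) :
    pvFinalA dA = solution_alt survey choices := by
  obtain ⟨hk, h1, h2, h3, h4⟩ := h
  unfold pvFinalA solution_alt
  rw [show PySem.List.pyRange 0 8 2 = [0, 2, 4, 6] from by decide]
  simp only [List.foldl_cons, List.foldl_nil, List.map_cons, List.map_nil, hk, pv_pull_ite]
  rw [show PySem.List.pyGetD pvKEYS (0:Int) ' ' = 'R' from by decide,
      show PySem.List.pyGetD pvKEYS ((0:Int)+1) ' ' = 'T' from by decide,
      show PySem.List.pyGetD pvKEYS (2:Int) ' ' = 'C' from by decide,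
      show PySem.List.pyGetD pvKEYS ((2:Int)+1) ' ' = 'F' from by decide,
      show PySem.List.pyGetD pvKEYS (4:Int) ' ' = 'J' from by decide,
      show PySem.List.pyGetD pvKEYS ((4:Int)+1) ' ' = 'M' from by decide,
      show PySem.List.pyGetD pvKEYS (6:Int) ' ' = 'A' from by decide,
      show PySem.List.pyGetD pvKEYS ((6:Int)+1) ' ' = 'N' from by decide]
  have e1 : (dA.getD 'R' 0 ≥ dA.getD 'T' 0) = (pvNet survey choices 'R' 'T' ≥ 0) := by
    simp only [eq_iff_iff, ge_iff_le]; omega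
  have e2 : (dA.getD 'C' 0 ≥ dA.getD 'F' 0) = (pvNet survey choices 'C' 'F' ≥ 0) := by
    simp only [eq_iff_iff, ge_iff_le]; omega
  have e3 : (dA.getD 'J' 0 ≥ dA.getD 'M' 0) = (pvNet survey choices 'J' 'M' ≥ 0) := by
    simp only [eq_iff_iff, ge_iff_le]; omega
  have e4 : (dA.getD 'A' 0 ≥ dA.getD 'N' 0) = (pvNet survey choices 'A' 'N' ≥ 0) := by
    simp only [eq_iff_iff, ge_iff_le]; omega
  simp only [e1, e2, e3, e4]
  exact pv_join4 _ _ _ _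

-- ===== VERDICT (by name: the statement is the Claim_ definition above) =====
theorem solution_spec : Claim_equal_solution := by
  intro survey choices _ hpre
  obtain ⟨hlen, hval⟩ := hpre
  show solution survey choices = solution_alt survey choices
  rw [pvA_eq, pvA_loop survey choices hlen]
  exact pv_final survey choices _
    (pv_inv_foldl (survey.zip choices) _ _ _ _ _ (fun p hp => hval p hp) pv_inv_init)
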